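-- pv_equiv track=rewrite | github.com/thetechbuilder/algorithms | segment_tree.py | build_min_matrix
-- ===== SOURCE A (Python) =====
-- def build_min_matrix(array):
--     array_length = len(array)
--     matrix = [
--         [array[i]]*array_length for i in range(array_length)
--     ]
--     for span in range(1, array_length):
--         i, j = 0, span
--         while j < array_length:
--             matrix[i][j] = min(matrix[i][j - 1], matrix[i + 1][j])
--             i += 1
--             j += 1
--     return matrix
-- ===== SOURCE B (Python) =====
-- def build_min_matrix(array):
--     n = len(array)
--     matrix = []
--     for i in range(n):
--         row = [array[i]] * n
--         cur = array[i]
--         for j in range(i, n):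
--             cur = min(cur, array[j])
--             row[j] = cur
--         matrix.append(row)
--     return matrix
-- ===== Notes on version B (the rewrite author's own statement) =====
-- stated objective: simpler
-- what changed: Replaces A's diagonal-by-diagonal dynamic-programming pass (matrix[i][j] = min(matrix[i][j-1], matrix[i+1][j]) over growing spans) with a row-major sweep that keeps a scalar running minimum per row.
import Mathlib
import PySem

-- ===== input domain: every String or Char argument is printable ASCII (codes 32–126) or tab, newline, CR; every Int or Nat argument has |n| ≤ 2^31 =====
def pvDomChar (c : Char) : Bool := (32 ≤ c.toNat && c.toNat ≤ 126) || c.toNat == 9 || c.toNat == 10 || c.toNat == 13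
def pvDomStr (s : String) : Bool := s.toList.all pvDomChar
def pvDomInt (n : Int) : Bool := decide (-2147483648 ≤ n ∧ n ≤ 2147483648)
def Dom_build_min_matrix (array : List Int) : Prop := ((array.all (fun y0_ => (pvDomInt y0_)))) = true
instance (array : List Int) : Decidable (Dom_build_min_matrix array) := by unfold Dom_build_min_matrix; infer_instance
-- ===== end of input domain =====

-- B replaces A's diagonal-by-diagonal DP recurrence with a per-row left-to-right running minimum (objective: simpler).

-- ===== PORT A =====
-- the inner `while j < array_length` loop of A (all indices stay in range, so the getD defaults are never used)
def pvWhileA (n : Nat) (i j : Nat) (m : List (List Int)) : List (List Int) :=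
  if _h : j < n then
    let v := min ((m.getD i []).getD (j - 1) 0) ((m.getD (i + 1) []).getD j 0)
    pvWhileA n (i + 1) (j + 1) (m.set i ((m.getD i []).set j v))
  else m
termination_by n - j

def build_min_matrix (array : List Int) : List (List Int) :=
  let n := array.length
  let matrix := (List.range n).map (fun i => List.replicate n (array.getD i 0))
  (List.range' 1 (n - 1)).foldl (fun m span => pvWhileA n 0 span m) matrix

-- ===== PORT B =====
-- row i of B: start from [array[i]]*n, sweep j = i..n-1 keeping a running minimum cur
def pvRowB (a : List Int) (n i : Nat) : List Int :=
  ((List.range' i (n - i)).foldl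
    (fun (st : List Int × Int) j =>
      let cur := min st.2 (a.getD j 0)
      (st.1.set j cur, cur))
    (List.replicate n (a.getD i 0), a.getD i 0)).1

def build_min_matrix_alt (array : List Int) : List (List Int) :=
  (List.range array.length).map (fun i => pvRowB array array.length i)

-- ===== PRECONDITION & SPEC =====
def Spec_build_min_matrix (array : List Int) (out : List (List Int)) : Prop := out = build_min_matrix_alt array
instance (array : List Int) (out : List (List Int)) : Decidable (Spec_build_min_matrix array out) := by unfold Spec_build_min_matrix; infer_instance

-- ===== CLAIM (what is proved, stated in full; the proofs are below) =====
def Claim_equal_build_min_matrix : Prop := ∀ (array : List Int), Dom_build_min_matrix array → Spec_build_min_matrix array (build_min_matrix array)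

-- ===== LEMMAS AND PROOFS =====

-- minimum of a.getD over the index range [i, j]
def rmin (a : List Int) (i j : Nat) : Int :=
  (List.range' (i + 1) (j - i)).foldl (fun acc k => min acc (a.getD k 0)) (a.getD i 0)

-- matrix entry (getD-based, total)
def pvG (m : List (List Int)) (i j : Nat) : Int := (m.getD i []).getD j 0

lemma rmin_self (a : List Int) (i : Nat) : rmin a i i = a.getD i 0 := by
  simp [rmin]

lemma rmin_succ (a : List Int) {i j : Nat} (h : i ≤ j) :
    rmin a i (j + 1) = min (rmin a i j) (a.getD (j + 1) 0) := by
  have h1 : j + 1 - i = (j - i) + 1 := by omega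
  have h2 : i + 1 + (j - i) = j + 1 := by omega
  simp only [rmin, h1, List.range'_concat, List.foldl_append, List.foldl_cons,
    List.foldl_nil, one_mul, h2]

lemma rmin_split (a : List Int) {i j : Nat} (h : i < j) :
    rmin a i j = min (a.getD i 0) (rmin a (i + 1) j) := by
  induction j with
  | zero => omega
  | succ k ih =>
    rcases Nat.lt_or_ge i k with hik | hik
    · rw [rmin_succ a (by omega : i ≤ k), ih hik, rmin_succ a (by omega : i + 1 ≤ k),
        min_assoc]
    · have hik' : i = k := by omega
      subst hik'
      rw [rmin_succ a (le_refl i), rmin_self a i, rmin_self a (i + 1)]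

lemma rmin_rec (a : List Int) {i j : Nat} (h : i < j) :
    min (rmin a i (j - 1)) (rmin a (i + 1) j) = rmin a i j := by
  rcases j with _ | k
  · omega
  · have hk : i ≤ k := by omega
    simp only [Nat.add_sub_cancel]
    rcases Nat.lt_or_ge i k with hik | hik
    · have hsplit : min (rmin a i k) (rmin a (i + 1) k) = rmin a i k := by
        rw [rmin_split a hik, min_assoc, min_self, ← rmin_split a hik]
      rw [rmin_succ a (by omega : i + 1 ≤ k), ← min_assoc, hsplit, ← rmin_succ a hk]
    · have hik' : i = k := by omega
      subst hik'
      rw [rmin_self a i, rmin_self a (i + 1), rmin_succ a (le_refl i), rmin_self a i]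

lemma getD_set_lists {α : Type} (d : α) (l : List α) (i j : Nat) (v : α) :
    (l.set i v).getD j d = if j = i ∧ i < l.length then v else l.getD j d := by
  rcases Nat.lt_or_ge j l.length with hj | hj
  · rw [List.getD_eq_getElem _ _ (by simpa using hj : j < (l.set i v).length),
      List.getD_eq_getElem _ _ hj, List.getElem_set]
    by_cases h : i = j
    · subst h; rw [if_pos rfl, if_pos ⟨rfl, hj⟩]
    · rw [if_neg h, if_neg (by omega)]
  · have h1 : (l.set i v).length ≤ j := by simpa using hj
    rw [List.getD_eq_default _ _ h1, List.getD_eq_default _ _ hj]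
    split_ifs with h
    · omega
    · rfl

lemma getD_map_range'' {α : Type} (f : Nat → α) (n i : Nat) (d : α) (h : i < n) :
    (((List.range n).map f).getD i d) = f i := by
  rw [List.getD_eq_getElem _ _ (by simpa using h)]
  simp

lemma pvG_set (m : List (List Int)) (i j : Nat) (v : Int) (i' j' : Nat)
    (hi : i < m.length) (hj : j < (m.getD i []).length) :
    pvG (m.set i ((m.getD i []).set j v)) i' j' =
      if i' = i ∧ j' = j then v else pvG m i' j' := by
  unfold pvG
  rw [getD_set_lists]
  by_cases h1 : i' = i
  · subst h1
    rw [if_pos ⟨rfl, hi⟩, getD_set_lists]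
    by_cases h2 : j' = j
    · rw [if_pos ⟨h2, hj⟩, if_pos ⟨rfl, h2⟩]
    · rw [if_neg (fun hc => h2 hc.1), if_neg (fun hc => h2 hc.2)]
  · rw [if_neg (fun hc => h1 hc.1), if_neg (fun hc => h1 hc.1)]

-- invariant of A's inner while loop for a fixed span s
lemma whileA_inv (a : List Int) (n s : Nat) (hs : 1 ≤ s) :
    ∀ t k m, n - (k + s) = t → m.length = n → (∀ r ∈ m, r.length = n) →
    (∀ i j, i < n → j < n → pvG m i j =
      if i ≤ j ∧ (j < i + s ∨ (j = i + s ∧ i < k)) then rmin a i j else a.getD i 0) →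
    (pvWhileA n k (k + s) m).length = n ∧
    (∀ r ∈ pvWhileA n k (k + s) m, r.length = n) ∧
    (∀ i j, i < n → j < n → pvG (pvWhileA n k (k + s) m) i j =
      if i ≤ j ∧ j ≤ i + s then rmin a i j else a.getD i 0) := by
  intro t
  induction t with
  | zero =>
    intro k m ht hlen hrows hent
    rw [pvWhileA]
    have hge : ¬ (k + s < n) := by omega
    simp only [hge, dite_false]
    refine ⟨hlen, hrows, fun i j hi hj => ?_⟩
    rw [hent i j hi hj]
    have hiff : (i ≤ j ∧ (j < i + s ∨ (j = i + s ∧ i < k))) ↔ (i ≤ j ∧ j ≤ i + s) := by omega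
    rw [if_congr hiff rfl rfl]
  | succ t ih =>
    intro k m ht hlen hrows hent
    rw [pvWhileA]
    have hlt : k + s < n := by omega
    simp only [hlt, dite_true]
    have hkm : k < m.length := by omega
    have hgd : m.getD k [] = m[k] := List.getD_eq_getElem m [] hkm
    have hrowlen : (m.getD k []).length = n := by
      rw [hgd]; exact hrows _ (List.getElem_mem hkm)
    have hv1 : (m.getD k []).getD (k + s - 1) 0 = rmin a k (k + s - 1) := by
      have := hent k (k + s - 1) (by omega) (by omega)
      rw [pvG] at this
      rw [this, if_pos (by omega)]
    have hv2 : (m.getD (k + 1) []).getD (k + s) 0 = rmin a (k + 1) (k + s) := by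
      have := hent (k + 1) (k + s) (by omega) (by omega)
      rw [pvG] at this
      rw [this, if_pos (by omega)]
    have hv : min ((m.getD k []).getD (k + s - 1) 0) ((m.getD (k + 1) []).getD (k + s) 0)
        = rmin a k (k + s) := by
      rw [hv1, hv2]; exact rmin_rec a (by omega)
    set v := min ((m.getD k []).getD (k + s - 1) 0) ((m.getD (k + 1) []).getD (k + s) 0) with hvdef
    set m' := m.set k ((m.getD k []).set (k + s) v) with hm'
    have hlen' : m'.length = n := by simp [hm', hlen]
    have hrows' : ∀ r ∈ m', r.length = n := by
      intro r hr
      rcases List.mem_or_eq_of_mem_set hr with h | h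
      · exact hrows r h
      · rw [h, List.length_set]; exact hrowlen
    have hent' : ∀ i j, i < n → j < n → pvG m' i j =
        if i ≤ j ∧ (j < i + s ∨ (j = i + s ∧ i < k + 1)) then rmin a i j else a.getD i 0 := by
      intro i j hi hj
      rw [hm', pvG_set m k (k + s) v i j hkm (by omega)]
      by_cases hcase : i = k ∧ j = k + s
      · rw [if_pos hcase, hv, hcase.1, hcase.2, if_pos (by omega)]
      · rw [if_neg hcase, hent i j hi hj]
        have hiff : (i ≤ j ∧ (j < i + s ∨ (j = i + s ∧ i < k))) ↔
            (i ≤ j ∧ (j < i + s ∨ (j = i + s ∧ i < k + 1))) := by omega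
        rw [if_congr hiff rfl rfl]
    have := ih (k + 1) m' (by omega) hlen' hrows' hent'
    rw [show k + 1 + s = k + s + 1 from by omega] at this
    exact this

-- invariant of A's span loop
lemma spans_inv (a : List Int) (n : Nat) :
    ∀ t s m, 1 ≤ s → m.length = n → (∀ r ∈ m, r.length = n) →
    (∀ i j, i < n → j < n → pvG m i j =
      if i ≤ j ∧ j ≤ i + (s - 1) then rmin a i j else a.getD i 0) →
    ((List.range' s t).foldl (fun m span => pvWhileA n 0 span m) m).length = n ∧
    (∀ r ∈ (List.range' s t).foldl (fun m span => pvWhileA n 0 span m) m, r.length = n) ∧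
    (∀ i j, i < n → j < n →
      pvG ((List.range' s t).foldl (fun m span => pvWhileA n 0 span m) m) i j =
      if i ≤ j ∧ j ≤ i + (s - 1 + t) then rmin a i j else a.getD i 0) := by
  intro t
  induction t with
  | zero =>
    intro s m hs hlen hrows hent
    simpa using ⟨hlen, hrows, hent⟩
  | succ t ih =>
    intro s m hs hlen hrows hent
    rw [List.range'_succ, List.foldl_cons]
    have hstep := whileA_inv a n s hs (n - (0 + s)) 0 m rfl hlen hrows (by
      intro i j hi hj
      rw [hent i j hi hj]
      have hiff : (i ≤ j ∧ j ≤ i + (s - 1)) ↔ (i ≤ j ∧ (j < i + s ∨ (j = i + s ∧ i < 0))) := by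
        omega
      rw [if_congr hiff rfl rfl])
    rw [show (0 : Nat) + s = s from by omega] at hstep
    have := ih (s + 1) (pvWhileA n 0 s m) (by omega) hstep.1 hstep.2.1 (by
      intro i j hi hj
      rw [hstep.2.2 i j hi hj]
      have hiff : (i ≤ j ∧ j ≤ i + s) ↔ (i ≤ j ∧ j ≤ i + (s + 1 - 1)) := by omega
      rw [if_congr hiff rfl rfl])
    rw [show s + 1 - 1 + t = s - 1 + (t + 1) from by omega] at this
    exact this

-- characterisation of port A's result
lemma A_char (a : List Int) :
    (build_min_matrix a).length = a.length ∧
    (∀ r ∈ build_min_matrix a, r.length = a.length) ∧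
    (∀ i j, i < a.length → j < a.length → pvG (build_min_matrix a) i j =
      if i ≤ j then rmin a i j else a.getD i 0) := by
  set n := a.length with hn
  have hinit : ∀ i j, i < n → j < n →
      pvG ((List.range n).map (fun i => List.replicate n (a.getD i 0))) i j =
      if i ≤ j ∧ j ≤ i + (1 - 1) then rmin a i j else a.getD i 0 := by
    intro i j hi hj
    rw [pvG, getD_map_range'' _ _ _ _ hi,
      List.getD_eq_getElem _ _ (by simpa using hj), List.getElem_replicate]
    by_cases h : i ≤ j ∧ j ≤ i + (1 - 1)
    · have hij : i = j := by omega
      rw [if_pos h, ← hij, rmin_self]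
    · rw [if_neg h]
  have := spans_inv a n (n - 1) 1 ((List.range n).map (fun i => List.replicate n (a.getD i 0)))
    (le_refl 1) (by simp) (by intro r hr; rcases List.mem_map.1 hr with ⟨x, _, hx⟩; simp [← hx])
    hinit
  unfold build_min_matrix
  refine ⟨this.1, this.2.1, fun i j hi hj => ?_⟩
  rw [this.2.2 i j hi hj]
  have hiff : (i ≤ j ∧ j ≤ i + (1 - 1 + (n - 1))) ↔ i ≤ j := by omega
  rw [if_congr hiff rfl rfl]

-- invariant of B's per-row running-minimum sweep
lemma rowB_inv (a : List Int) (n i : Nat) :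
    ∀ t j0 row cur, i ≤ j0 → j0 + t = n → row.length = n →
    (∀ j, j < n → row.getD j 0 = if i ≤ j ∧ j < j0 then rmin a i j else a.getD i 0) →
    (min cur (a.getD j0 0) = rmin a i j0) →
    (((List.range' j0 t).foldl
      (fun (st : List Int × Int) j =>
        let cur := min st.2 (a.getD j 0)
        (st.1.set j cur, cur)) (row, cur)).1.length = n) ∧
    (∀ j, j < n → ((List.range' j0 t).foldl
      (fun (st : List Int × Int) j =>
        let cur := min st.2 (a.getD j 0)
        (st.1.set j cur, cur)) (row, cur)).1.getD j 0 =
      if i ≤ j then rmin a i j else a.getD i 0) := by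
  intro t
  induction t with
  | zero =>
    intro j0 row cur hij0 ht hlen hent _hcur
    simp only [List.range'_zero, List.foldl_nil]
    refine ⟨hlen, fun j hj => ?_⟩
    rw [hent j hj]
    have hiff : (i ≤ j ∧ j < j0) ↔ i ≤ j := by omega
    rw [if_congr hiff rfl rfl]
  | succ t ih =>
    intro j0 row cur hij0 ht hlen hent hcur
    rw [List.range'_succ, List.foldl_cons]
    refine ih (j0 + 1) (row.set j0 (min cur (a.getD j0 0))) (min cur (a.getD j0 0))
      (by omega) (by omega) (by simp [hlen]) ?_ ?_
    · intro j hj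
      rw [getD_set_lists]
      by_cases h : j = j0 ∧ j0 < row.length
      · rw [if_pos h, hcur, h.1, if_pos (by omega)]
      · rw [if_neg h, hent j hj]
        have hj0 : j0 < row.length := by omega
        have hiff : (i ≤ j ∧ j < j0) ↔ (i ≤ j ∧ j < j0 + 1) := by
          constructor
          · rintro ⟨h1, h2⟩; exact ⟨h1, by omega⟩
          · rintro ⟨h1, h2⟩
            refine ⟨h1, ?_⟩
            rcases Nat.lt_or_ge j j0 with h3 | h3
            · exact h3
            · exact absurd ⟨by omega, hj0⟩ h
        rw [if_congr hiff rfl rfl]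
    · rw [hcur, rmin_succ a hij0]

-- characterisation of port B's result
lemma B_char (a : List Int) :
    (build_min_matrix_alt a).length = a.length ∧
    (∀ r ∈ build_min_matrix_alt a, r.length = a.length) ∧
    (∀ i j, i < a.length → j < a.length → pvG (build_min_matrix_alt a) i j =
      if i ≤ j then rmin a i j else a.getD i 0) := by
  have hrow : ∀ i, i < a.length → (pvRowB a a.length i).length = a.length ∧
      (∀ j, j < a.length → (pvRowB a a.length i).getD j 0 =
        if i ≤ j then rmin a i j else a.getD i 0) := by
    intro i hi
    have := rowB_inv a a.length i (a.length - i) i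
      (List.replicate a.length (a.getD i 0)) (a.getD i 0)
      (le_refl i) (by omega) (by simp)
      (by intro j hj; rw [if_neg (by omega), List.getD_eq_getElem _ _ (by simpa using hj),
            List.getElem_replicate])
      (by rw [min_self, rmin_self])
    exact ⟨this.1, this.2⟩
  have hlen : (build_min_matrix_alt a).length = a.length := by simp [build_min_matrix_alt]
  refine ⟨hlen, ?_, ?_⟩
  · intro r hr
    rcases List.mem_map.1 hr with ⟨x, hx, hxr⟩
    rw [← hxr]
    exact (hrow x (by simpa using List.mem_range.1 hx)).1
  · intro i j hi hj
    rw [pvG, build_min_matrix_alt, getD_map_range'' _ _ _ _ hi]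
    exact (hrow i hi).2 j hj

-- ===== VERDICT (by name: the statement is the Claim_ definition above) =====
theorem build_min_matrix_spec : Claim_equal_build_min_matrix := by
  intro array _
  unfold Spec_build_min_matrix
  obtain ⟨hAlen, hArows, hAent⟩ := A_char array
  obtain ⟨hBlen, hBrows, hBent⟩ := B_char array
  apply List.ext_getElem (hAlen.trans hBlen.symm)
  intro i hi1 hi2
  have hin : i < array.length := hAlen ▸ hi1
  have hrA : (build_min_matrix array)[i].length = array.length :=
    hArows _ (List.getElem_mem hi1)
  have hrB : (build_min_matrix_alt array)[i].length = array.length :=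
    hBrows _ (List.getElem_mem hi2)
  apply List.ext_getElem (hrA.trans hrB.symm)
  intro j hj1 hj2
  have hjn : j < array.length := hrA ▸ hj1
  have hA := hAent i j hin hjn
  have hB := hBent i j hin hjn
  rw [pvG, List.getD_eq_getElem _ _ hi1, List.getD_eq_getElem _ _ hj1] at hA
  rw [pvG, List.getD_eq_getElem _ _ hi2, List.getD_eq_getElem _ _ hj2] at hB
  rw [hA, hB]
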